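-- pv_equiv track=rewrite | github.com/flo-compbio/singlecell | singlecell/util.py | get_edit_sequences
-- ===== SOURCE A (Python) =====
-- import itertools
--
-- def get_edit_sequences(seq, num_edits, bases=None):
--     """Return all nucleotide sequences with a given hamming distance."""
--
--     if num_edits > len(seq):
--         raise ValueError('Asked to make make more edits (%d) than the length '
--                          'of the sequence (%d nt).' % (num_edits, len(seq)))
--
--     if bases is None:
--         bases = set('ACGT')
--
--     length = len(seq)
--     all_bases = [bases for i in range(num_edits)]
--     seq_list = [nt for nt in seq]
--     mismatch = []
--     for comb in itertools.combinations(range(length), num_edits):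
--         for subs in itertools.product(*all_bases):
--             mut = seq_list[:]
--             valid = True
--             for pos, nt in zip(comb, subs):
--                 if mut[pos] == nt:
--                     valid = False
--                     break
--                 mut[pos] = nt
--             if valid:
--                 mismatch.append(''.join(mut))
--
--     return sorted(mismatch)
-- ===== SOURCE B (Python) =====
-- def get_edit_sequences(seq, num_edits, bases=None):
--     """Return all nucleotide sequences with a given hamming distance."""
--     if num_edits > len(seq):
--         raise ValueError('Asked to make make more edits (%d) than the length '
--                          'of the sequence (%d nt).' % (num_edits, len(seq)))
--     if bases is None:
--         bases = set('ACGT')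
--
--     def go(pos, budget):
--         # all suffixes of seq[pos:] that use exactly `budget` further edits
--         if pos == len(seq):
--             return [''] if budget == 0 else []
--         cur = seq[pos]
--         res = [cur + s for s in go(pos + 1, budget)]
--         if budget > 0:
--             for nt in bases:
--                 if nt != cur:
--                     res += [nt + s for s in go(pos + 1, budget - 1)]
--         return res
--
--     return sorted(go(0, num_edits))
-- ===== Notes on version B (the rewrite author's own statement) =====
-- stated objective: alternative
-- what changed: Replaces A's enumeration of itertools.combinations(positions) x itertools.product(bases,...) with a per-candidate validity re-check by a single recursive backtracking pass over the positions that carries the remaining edit budget and only ever branches to bases differing from the current character.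
import Mathlib
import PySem

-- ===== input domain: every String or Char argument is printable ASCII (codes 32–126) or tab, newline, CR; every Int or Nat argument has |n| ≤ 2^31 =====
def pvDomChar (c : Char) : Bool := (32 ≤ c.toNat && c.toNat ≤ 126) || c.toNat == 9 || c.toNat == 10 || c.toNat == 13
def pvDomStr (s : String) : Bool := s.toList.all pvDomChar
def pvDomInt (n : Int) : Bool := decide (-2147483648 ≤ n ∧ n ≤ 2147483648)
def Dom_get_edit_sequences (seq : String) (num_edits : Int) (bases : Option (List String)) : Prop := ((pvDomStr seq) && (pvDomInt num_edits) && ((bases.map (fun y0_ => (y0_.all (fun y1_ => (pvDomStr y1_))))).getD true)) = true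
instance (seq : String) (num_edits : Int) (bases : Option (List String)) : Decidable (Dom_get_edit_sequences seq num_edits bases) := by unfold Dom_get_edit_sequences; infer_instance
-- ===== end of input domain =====

-- B replaces A's combinations×product enumeration (with a validity re-check) by one recursive
-- backtracking pass over the positions carrying the remaining edit budget (objective: alternative).

-- ===== PORT A =====
-- itertools.combinations(l, k), in itertools' lexicographic order
def pvCombs : List Int → Nat → List (List Int)
  | _, 0 => [[]]
  | [], _ + 1 => []
  | x :: xs, k + 1 => (pvCombs xs k).map (fun c => x :: c) ++ pvCombs xs (k + 1)

-- itertools.product(*([bases] * k)), leftmost factor varying slowest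
def pvProdRep (bases : List String) : Nat → List (List String)
  | 0 => [[]]
  | k + 1 => bases.flatMap (fun b => (pvProdRep bases k).map (fun s => b :: s))

-- the inner 'for pos, nt in zip(comb, subs)' loop: `none` = the `valid = False; break` path
def pvApplyEdits : List String → List (Int × String) → Option (List String)
  | mu, [] => some mu
  | mu, (pos, nt) :: rest =>
    match PySem.List.pyGet? mu pos with
    | none => none
    | some cur =>
      if cur == nt then none
      else pvApplyEdits (PySem.List.pySetD mu pos nt) rest

def get_edit_sequences (seq : String) (num_edits : Int) (bases : Option (List String)) : List String :=
  if num_edits > PySem.Str.len seq then []   -- Python raises ValueError here (excluded by Pre_)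
  else
    let basesL : List String := match bases with
      | none => PySem.Set.ofList ["A", "C", "G", "T"]
      | some b => b
    let length := PySem.Str.len seq
    let seq_list : List String := seq.toList.map (fun c => String.ofList [c])
    let mismatch : List String :=
      (pvCombs (PySem.List.pyRange 0 length) num_edits.toNat).flatMap (fun comb =>
        (pvProdRep basesL num_edits.toNat).flatMap (fun subs =>
          match pvApplyEdits seq_list (comb.zip subs) with
          | some mu => [PySem.Str.join "" mu]
          | none => []))
    PySem.List.sorted mismatch (fun x => x) false

-- ===== PORT B =====
-- go(pos, budget): all suffixes of seq[pos:] using exactly `budget` further edits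
def pvGo (bases : List String) : List Char → Int → List String
  | [], budget => if budget == 0 then [""] else []
  | c :: rest, budget =>
    let cur := String.ofList [c]
    (pvGo bases rest budget).map (fun s => cur ++ s) ++
      (if budget > 0 then
        bases.flatMap (fun nt =>
          if nt == cur then [] else (pvGo bases rest (budget - 1)).map (fun s => nt ++ s))
      else [])

def get_edit_sequences_alt (seq : String) (num_edits : Int) (bases : Option (List String)) : List String :=
  if num_edits > PySem.Str.len seq then []   -- Python raises ValueError here (excluded by Pre_)
  else
    let basesL : List String := match bases with
      | none => PySem.Set.ofList ["A", "C", "G", "T"]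
      | some b => b
    PySem.List.sorted (pvGo basesL seq.toList num_edits) (fun x => x) false

-- ===== PRECONDITION & SPEC =====
-- A raises ValueError when num_edits > len(seq) (explicit check) and when num_edits < 0
-- (itertools.combinations rejects a negative r); Pre_ excludes exactly those inputs.
def Pre_get_edit_sequences (seq : String) (num_edits : Int) (bases : Option (List String)) : Prop :=
  0 ≤ num_edits ∧ num_edits ≤ PySem.Str.len seq
instance (seq : String) (num_edits : Int) (bases : Option (List String)) : Decidable (Pre_get_edit_sequences seq num_edits bases) := by unfold Pre_get_edit_sequences; infer_instance

def pvWitness_get_edit_sequences : String × Int × Option (List String) := ("AC", 1, none)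

def Spec_get_edit_sequences (seq : String) (num_edits : Int) (bases : Option (List String)) (out : List String) : Prop := out = get_edit_sequences_alt seq num_edits bases
instance (seq : String) (num_edits : Int) (bases : Option (List String)) (out : List String) : Decidable (Spec_get_edit_sequences seq num_edits bases out) := by unfold Spec_get_edit_sequences; infer_instance

-- ===== CLAIM (what is proved, stated in full; the proofs are below) =====
def Claim_equal_get_edit_sequences : Prop := ∀ (seq : String) (num_edits : Int) (bases : Option (List String)), Dom_get_edit_sequences seq num_edits bases → Pre_get_edit_sequences seq num_edits bases → Spec_get_edit_sequences seq num_edits bases (get_edit_sequences seq num_edits bases)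

-- ===== LEMMAS AND PROOFS =====

-- proof-side: A's per-(comb,subs) results as lists of pieces (before ''.join)
def pvOptL {α : Type} : Option α → List α
  | some a => [a]
  | none => []

def pvListA (bases : List String) (ls : List String) (k : Nat) : List (List String) :=
  (pvCombs (PySem.List.pyRange 0 (ls.length : Int)) k).flatMap (fun comb =>
    (pvProdRep bases k).flatMap (fun subs => pvOptL (pvApplyEdits ls (comb.zip subs))))

-- proof-side: B's recursion on lists of pieces with a Nat budget
def pvGoS (bases : List String) : List String → Nat → List (List String)
  | [], 0 => [[]]
  | [], _ + 1 => []
  | x :: ls, k =>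
    (pvGoS bases ls k).map (fun m => x :: m) ++
      (match k with
       | 0 => []
       | k' + 1 =>
         bases.flatMap (fun nt =>
           if x == nt then [] else (pvGoS bases ls k').map (fun m => nt :: m)))

theorem pvOptL_map {α β : Type} (f : α → β) (o : Option α) : pvOptL (o.map f) = (pvOptL o).map f := by
  cases o <;> rfl

theorem pvCombs_map (f : Int → Int) (l : List Int) : ∀ k, pvCombs (l.map f) k = (pvCombs l k).map (List.map f) := by
  induction l with
  | nil => intro k; cases k <;> simp [pvCombs]
  | cons x xs ih =>
    intro k
    cases k with
    | zero => simp [pvCombs]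
    | succ k => simp [pvCombs, ih, List.map_append, List.map_map, Function.comp]

theorem pvCombs_mem (l : List Int) : ∀ (k : Nat) (c : List Int), c ∈ pvCombs l k → ∀ p ∈ c, p ∈ l := by
  induction l with
  | nil =>
    intro k c hc p hp
    cases k with
    | zero => simp [pvCombs] at hc; subst hc; simp at hp
    | succ k => simp [pvCombs] at hc
  | cons x xs ih =>
    intro k c hc p hp
    cases k with
    | zero => simp [pvCombs] at hc; subst hc; simp at hp
    | succ k =>
      simp only [pvCombs, List.mem_append, List.mem_map] at hc
      rcases hc with ⟨c', hc', rfl⟩ | hc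
      · rcases List.mem_cons.mp hp with rfl | hp'
        · exact List.mem_cons_self ..
        · exact List.mem_cons_of_mem _ (ih k c' hc' p hp')
      · exact List.mem_cons_of_mem _ (ih (k + 1) c hc p hp)

theorem pvApplyEdits_shift (x : String) : ∀ (prs : List (Int × String)), (∀ pr ∈ prs, 0 ≤ pr.1) →
    ∀ ls : List String, pvApplyEdits (x :: ls) (prs.map (Prod.map (· + 1) id)) = (pvApplyEdits ls prs).map (fun m => x :: m) := by
  intro prs
  induction prs with
  | nil => intro _ ls; rfl
  | cons pr rest ih =>
    obtain ⟨p, nt⟩ := pr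
    intro h ls
    have hp : (0 : Int) ≤ p := h _ (List.mem_cons_self ..)
    have hrest : ∀ pr ∈ rest, (0 : Int) ≤ pr.1 := fun pr hpr => h pr (List.mem_cons_of_mem _ hpr)
    lift p to Nat using hp
    have hcast : ((p : Int) + 1) = ((p + 1 : Nat) : Int) := by push_cast; ring
    simp only [List.map_cons, Prod.map, id_eq, pvApplyEdits, hcast,
      PySem.List.pyGet?_natCast, List.getElem?_cons_succ]
    cases hg : ls[p]? with
    | none => rfl
    | some cur =>
      by_cases hc : cur = nt
      · simp [hc]
      · simp only [hc, beq_iff_eq, if_false, PySem.List.pySetD_natCast, List.set_cons_succ]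
        exact ih hrest (ls.set p nt)

theorem pvGoS_zero (bases : List String) (ls : List String) : pvGoS bases ls 0 = [ls] := by
  induction ls with
  | nil => rfl
  | cons x t ih => simp [pvGoS, ih]

theorem pvJoin_cons (a : String) (parts : List String) :
    PySem.Str.join "" (a :: parts) = a ++ PySem.Str.join "" parts := by
  apply String.toList_inj.mp
  rw [String.toList_append, PySem.Str.toList_join, PySem.Str.toList_join]
  cases parts with
  | nil => simp [PySem.Chars.join_singleton, PySem.Chars.join_nil]
  | cons b rbs => simp [PySem.Chars.join_cons_cons]

theorem pvGo_eq (bases : List String) : ∀ (cs : List Char) (k : Nat),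
    pvGo bases cs (k : Int) = (pvGoS bases (cs.map (fun c => String.ofList [c])) k).map (PySem.Str.join "") := by
  intro cs
  induction cs with
  | nil =>
    intro k
    have hjn : PySem.Str.join "" ([] : List String) = "" := by decide
    cases k with
    | zero => simp [pvGo, pvGoS, hjn]
    | succ k =>
      have h1 : ((k : Int) + 1) ≠ 0 := by omega
      simp [pvGo, pvGoS, h1]
  | cons c rest ih =>
    intro k
    have hmapped : ∀ j : Nat,
        ((pvGoS bases (rest.map (fun c => String.ofList [c])) j).map (PySem.Str.join "")).map (fun s => String.ofList [c] ++ s)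
          = ((pvGoS bases (rest.map (fun c => String.ofList [c])) j).map (fun m => String.ofList [c] :: m)).map (PySem.Str.join "") := by
      intro j
      rw [List.map_map, List.map_map]
      refine List.map_congr_left ?_
      intro m _
      simp only [Function.comp_apply]
      rw [pvJoin_cons]
    cases k with
    | zero =>
      have h0 : ¬ ((0 : Int) > 0) := by omega
      have ih0 := ih 0
      rw [Nat.cast_zero] at ih0
      simp only [pvGo, pvGoS, Nat.cast_zero, h0, if_false, List.append_nil, List.map_cons]
      rw [ih0]
      simpa using hmapped 0
    | succ k =>
      have hpos : (((k + 1 : Nat) : Int)) > 0 := by exact_mod_cast Int.natCast_pos.mpr (Nat.succ_pos k)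
      have hsub : (((k + 1 : Nat) : Int)) - 1 = (k : Int) := by push_cast; ring
      simp only [pvGo, pvGoS, List.map_cons, List.map_append, hsub, if_pos hpos]
      congr 1
      · rw [ih (k + 1)]
        exact hmapped (k + 1)
      · rw [List.map_flatMap]
        refine List.flatMap_congr ?_
        intro nt _
        by_cases hnt : nt = String.ofList [c]
        · simp [hnt]
        · have hb1 : (nt == String.ofList [c]) = false := beq_eq_false_iff_ne.mpr hnt
          have hb2 : (String.ofList [c] == nt) = false := beq_eq_false_iff_ne.mpr (Ne.symm hnt)
          simp only [hb1, hb2, Bool.false_eq_true, if_false]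
          rw [ih k, List.map_map, List.map_map]
          refine List.map_congr_left ?_
          intro m _
          simp only [Function.comp_apply]
          rw [pvJoin_cons]

theorem pvMain (bases : List String) : ∀ (ls : List String) (k : Nat),
    ((pvListA bases ls k : List (List String)) : Multiset (List String)) = ↑(pvGoS bases ls k) := by
  intro ls
  induction ls with
  | nil =>
    intro k
    cases k with
    | zero => rfl
    | succ k =>
      simp [pvListA, pvGoS, pvCombs]
  | cons x t ih =>
    intro k
    cases k with
    | zero =>
      have h1 : pvListA bases (x :: t) 0 = [x :: t] := by
        simp [pvListA, pvCombs, pvProdRep, pvApplyEdits, pvOptL]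
      rw [h1, pvGoS_zero]
    | succ k =>
      have hrange : PySem.List.pyRange 0 (((x :: t).length : Nat) : Int)
          = (0 : Int) :: (PySem.List.pyRange 0 (t.length : Int)).map (· + 1) := by
        rw [List.length_cons]
        rw [PySem.List.pyRange_zero_natCast, PySem.List.pyRange_zero_natCast, List.range_succ_eq_map]
        simp only [List.map_cons, Nat.cast_zero, List.map_map]
        congr 1
      have hnn : ∀ (j : Nat), ∀ comb ∈ pvCombs (PySem.List.pyRange 0 (t.length : Int)) j,
          ∀ (subs : List String), ∀ pr ∈ comb.zip subs, (0 : Int) ≤ pr.1 := by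
        intro j comb hcomb subs pr hpr
        have hmem : pr.1 ∈ comb := (List.of_mem_zip hpr).1
        have hin := pvCombs_mem _ j comb hcomb pr.1 hmem
        rw [PySem.List.pyRange_zero_natCast] at hin
        simp only [List.mem_map] at hin
        obtain ⟨m, -, hm⟩ := hin
        rw [← hm]
        exact Int.natCast_nonneg m
      have happly2 : ∀ comb ∈ pvCombs (PySem.List.pyRange 0 (t.length : Int)) (k + 1), ∀ subs : List String,
          pvApplyEdits (x :: t) ((comb.map (· + 1)).zip subs)
            = (pvApplyEdits t (comb.zip subs)).map (fun m => x :: m) := by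
        intro comb hcomb subs
        rw [List.zip_map_left, pvApplyEdits_shift x _ (hnn _ comb hcomb subs)]
      have happly1 : ∀ comb ∈ pvCombs (PySem.List.pyRange 0 (t.length : Int)) k, ∀ (nt : String) (subs : List String),
          pvOptL (pvApplyEdits (x :: t) (((0 : Int) :: comb.map (· + 1)).zip (nt :: subs)))
            = if x == nt then [] else (pvOptL (pvApplyEdits t (comb.zip subs))).map (fun m => nt :: m) := by
        intro comb hcomb nt subs
        show pvOptL (pvApplyEdits (x :: t) (((0 : Int), nt) :: (comb.map (· + 1)).zip subs)) = _
        simp only [pvApplyEdits, PySem.List.pyGet?_zero_cons]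
        by_cases hx : x = nt
        · simp [hx, pvOptL]
        · have hxb : (x == nt) = false := by simp [hx]
          simp only [hxb, Bool.false_eq_true, if_false]
          rw [PySem.List.pySetD_of_nonneg (x :: t) nt (by omega)]
          simp only [Int.toNat_zero, List.set_cons_zero]
          rw [List.zip_map_left, pvApplyEdits_shift nt _ (hnn _ comb hcomb subs), pvOptL_map]
      -- abbreviate
      set R := PySem.List.pyRange 0 (t.length : Int) with hR
      have hsplit : pvListA bases (x :: t) (k + 1)
          = ((pvCombs R k).flatMap (fun comb => bases.flatMap (fun nt =>
               (pvProdRep bases k).flatMap (fun subs =>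
                 if x == nt then [] else (pvOptL (pvApplyEdits t (comb.zip subs))).map (fun m => nt :: m)))))
            ++ ((pvListA bases t (k + 1)).map (fun m => x :: m)) := by
        show (pvCombs (PySem.List.pyRange 0 (((x :: t).length : Nat) : Int)) (k + 1)).flatMap _ = _
        rw [hrange]
        show ((pvCombs ((R).map (· + 1)) k).map (fun c => (0 : Int) :: c)
              ++ pvCombs ((R).map (· + 1)) (k + 1)).flatMap _ = _
        rw [pvCombs_map, pvCombs_map, List.flatMap_append, List.flatMap_map, List.flatMap_map, List.flatMap_map]
        congr 1
        · refine List.flatMap_congr ?_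
          intro comb hcomb
          show (pvProdRep bases (k + 1)).flatMap _ = _
          rw [pvProdRep, List.flatMap_assoc]
          refine List.flatMap_congr ?_
          intro nt _
          rw [List.flatMap_map]
          refine List.flatMap_congr ?_
          intro subs _
          exact happly1 comb hcomb nt subs
        · show _ = (pvListA bases t (k + 1)).map _
          rw [pvListA, List.map_flatMap]
          refine List.flatMap_congr ?_
          intro comb hcomb
          rw [List.map_flatMap]
          refine List.flatMap_congr ?_
          intro subs _
          rw [happly2 comb hcomb subs, pvOptL_map]
      have hmapA : ∀ (nt : String),
          ((pvListA bases t k).map (fun m => nt :: m) : List (List String))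
            = (pvCombs R k).flatMap (fun comb => (pvProdRep bases k).flatMap (fun subs =>
                (pvOptL (pvApplyEdits t (comb.zip subs))).map (fun m => nt :: m))) := by
        intro nt
        rw [pvListA, List.map_flatMap]
        refine List.flatMap_congr ?_
        intro comb _
        rw [List.map_flatMap]
      have hgoS : pvGoS bases (x :: t) (k + 1)
          = (pvGoS bases t (k + 1)).map (fun m => x :: m)
            ++ bases.flatMap (fun nt =>
                 if x == nt then [] else (pvGoS bases t k).map (fun m => nt :: m)) := rfl
      rw [hsplit, hgoS]
      rw [← Multiset.coe_add, ← Multiset.coe_add]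
      have e2 : (↑((pvListA bases t (k + 1)).map (fun m => x :: m)) : Multiset (List String))
          = ↑((pvGoS bases t (k + 1)).map (fun m => x :: m)) := by
        rw [← Multiset.map_coe, ← Multiset.map_coe, ih (k + 1)]
      rw [e2, add_comm]
      congr 1
      · -- swap the comb and nt enumeration orders
        simp only [← Multiset.coe_bind]
        rw [Multiset.bind_bind]
        refine Multiset.bind_congr ?_
        intro nt _
        by_cases hx : x = nt
        · simp [hx, Multiset.bind_zero]
        · have hxb : (x == nt) = false := by simp [hx]
          simp only [hxb, Bool.false_eq_true, if_false]
          have hcollect : ((↑(pvCombs R k) : Multiset (List Int)).bind fun comb =>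
                (↑(pvProdRep bases k) : Multiset (List String)).bind fun subs =>
                  (↑((pvOptL (pvApplyEdits t (comb.zip subs))).map (fun m => nt :: m)) : Multiset (List String)))
              = ↑((pvListA bases t k).map (fun m => nt :: m)) := by
            rw [hmapA nt]
            simp only [← Multiset.coe_bind]
          rw [hcollect, ← Multiset.map_coe, ← Multiset.map_coe, ih k]

-- ===== VERDICT (by name: the statement is the Claim_ definition above) =====
theorem get_edit_sequences_spec : Claim_equal_get_edit_sequences := by
  unfold Claim_equal_get_edit_sequences
  intro seq ne bases hdom hpre
  clear hdom
  obtain ⟨h0, hle⟩ := hpre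
  unfold Spec_get_edit_sequences get_edit_sequences get_edit_sequences_alt
  rw [if_neg (by omega), if_neg (by omega)]
  dsimp only
  obtain ⟨k, rfl⟩ : ∃ k : Nat, ne = (k : Int) := ⟨ne.toNat, (Int.toNat_of_nonneg h0).symm⟩
  generalize (match bases with
    | none => PySem.Set.ofList ["A", "C", "G", "T"]
    | some b => b) = basesL
  rw [PySem.List.sorted_id_eq_sorted_id_iff_perm, pvGo_eq]
  have hopt : ∀ o : Option (List String),
      (match o with
       | some mu => [PySem.Str.join "" mu]
       | none => ([] : List String)) = (pvOptL o).map (PySem.Str.join "") := by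
    intro o; cases o <;> rfl
  have hlen : PySem.Str.len seq = ((seq.toList.map (fun c => String.ofList [c])).length : Int) := by
    simp [PySem.Str.len_eq]
  rw [hlen]
  have hmm : (pvCombs (PySem.List.pyRange 0 ((seq.toList.map (fun c => String.ofList [c])).length : Int)) ((k : Int)).toNat).flatMap
        (fun comb => (pvProdRep basesL ((k : Int)).toNat).flatMap (fun subs =>
          match pvApplyEdits (seq.toList.map (fun c => String.ofList [c])) (comb.zip subs) with
          | some mu => [PySem.Str.join "" mu]
          | none => []))
      = (pvListA basesL (seq.toList.map (fun c => String.ofList [c])) k).map (PySem.Str.join "") := by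
    rw [pvListA, List.map_flatMap]
    simp only [Int.toNat_natCast]
    refine List.flatMap_congr ?_
    intro comb _
    rw [List.map_flatMap]
    refine List.flatMap_congr ?_
    intro subs _
    exact hopt _
  rw [hmm]
  exact (Multiset.coe_eq_coe.mp (pvMain basesL (seq.toList.map (fun c => String.ofList [c])) k)).map _
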